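-- pv_equiv track=rewrite | github.com/Bettermaner/LC | src/(下一个排列)组合得到下一个比该数大的数.py | find
-- ===== SOURCE A (Python) =====
-- def find(strings,end):
--
--     while end >=1:
--         i = end -1
--         while i >=0:
--             if strings[end] > strings[i]:
--                 return i,end
--             i -= 1
--         end -= 1
--     return -1,-1
-- ===== SOURCE B (Python) =====
-- def find(strings, end):
--     # One forward pass with a running prefix-minimum locates the largest
--     # qualifying index e; a single backward scan then finds its partner i.
--     if end < 1:
--         return -1, -1
--     e_found = -1
--     mn = strings[0]
--     for e in range(1, end + 1):
--         v = strings[e]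
--         if v > mn:
--             e_found = e
--         if v < mn:
--             mn = v
--     if e_found == -1:
--         return -1, -1
--     target = strings[e_found]
--     for i in range(e_found - 1, -1, -1):
--         if target > strings[i]:
--             return i, e_found
--     return -1, -1
-- ===== Notes on version B (the rewrite author's own statement) =====
-- stated objective: faster
-- what changed: Replaces A's nested downward scans (for each end, rescan all earlier indices) with one forward pass keeping a running prefix minimum to locate the largest qualifying end, plus a single backward scan for its partner i.
import Mathlib
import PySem

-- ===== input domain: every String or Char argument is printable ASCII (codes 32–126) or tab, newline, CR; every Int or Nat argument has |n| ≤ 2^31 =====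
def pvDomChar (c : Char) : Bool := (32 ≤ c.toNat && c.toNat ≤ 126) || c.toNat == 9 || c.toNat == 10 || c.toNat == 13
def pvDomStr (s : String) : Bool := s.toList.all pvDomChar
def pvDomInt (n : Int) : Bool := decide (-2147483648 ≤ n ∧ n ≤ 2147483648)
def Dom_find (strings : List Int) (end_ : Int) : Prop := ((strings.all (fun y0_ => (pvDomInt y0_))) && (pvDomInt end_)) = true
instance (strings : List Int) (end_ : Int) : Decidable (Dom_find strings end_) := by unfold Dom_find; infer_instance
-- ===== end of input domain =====

-- B replaces A's nested downward scans with one forward prefix-minimum pass plus a single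
-- backward scan (O(n) instead of O(n^2)); return values agree on every input where A returns.


-- ===== PORT A =====
-- inner 'while i >= 0' loop; fuel = (i+1).toNat makes the recursion structural and exact
def innerA (s : List Int) (ve : Int) : Nat → Int → Option Int
  | 0, _ => none
  | fuel + 1, i =>
    if i ≥ 0 then
      if ve > PySem.List.pyGetD s i 0 then some i
      else innerA s ve fuel (i - 1)
    else none

-- outer 'while end >= 1' loop; fuel = end.toNat
def outerA (s : List Int) : Nat → Int → Int × Int
  | 0, _ => (-1, -1)
  | fuel + 1, e =>
    if e ≥ 1 then
      match innerA s (PySem.List.pyGetD s e 0) e.toNat (e - 1) with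
      | some i => (i, e)
      | none => outerA s fuel (e - 1)
    else (-1, -1)

def find (strings : List Int) (end_ : Int) : Int × Int :=
  outerA strings end_.toNat end_

-- ===== PORT B =====
-- one step of B's forward loop: state = (e_found, mn)
def fwdStep (s : List Int) (st : Int × Int) (e : Int) : Int × Int :=
  let v := PySem.List.pyGetD s e 0
  ((if v > st.2 then e else st.1), (if v < st.2 then v else st.2))

def find_alt (strings : List Int) (end_ : Int) : Int × Int :=
  if end_ < 1 then (-1, -1)
  else
    let st := (PySem.List.pyRange 1 (end_ + 1) 1).foldl (fwdStep strings)
      (-1, PySem.List.pyGetD strings 0 0)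
    if st.1 = -1 then (-1, -1)
    else
      let target := PySem.List.pyGetD strings st.1 0
      match (PySem.List.pyRange (st.1 - 1) (-1) (-1)).find?
          (fun i => decide (target > PySem.List.pyGetD strings i 0)) with
      | some i => (i, st.1)
      | none => (-1, -1)

-- ===== PRECONDITION & SPEC =====
-- Pre_ excludes exactly the inputs with end_ ≥ 1 ∧ end_ ≥ len(strings), on which Python A
-- raises IndexError at strings[end] (and B raises too).
def Pre_find (strings : List Int) (end_ : Int) : Prop :=
  end_ < (strings.length : Int) ∨ end_ < 1
instance (strings : List Int) (end_ : Int) : Decidable (Pre_find strings end_) := by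
  unfold Pre_find; infer_instance

def pvWitness_find : List Int × Int := ([3, 1, 2], 2)

def Spec_find (strings : List Int) (end_ : Int) (out : Int × Int) : Prop := out = find_alt strings end_
instance (strings : List Int) (end_ : Int) (out : Int × Int) : Decidable (Spec_find strings end_ out) := by unfold Spec_find; infer_instance

-- ===== CLAIM (what is proved, stated in full; the proofs are below) =====
def Claim_equal_find : Prop := ∀ (strings : List Int) (end_ : Int), Dom_find strings end_ → Pre_find strings end_ → Spec_find strings end_ (find strings end_)

-- ===== LEMMAS AND PROOFS =====

-- reference for both inner scans: first j in k-1, k-2, …, 0 with s[j] < v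
def scanRef (s : List Int) (v : Int) : Nat → Option Nat
  | 0 => none
  | k + 1 => if s.getD k 0 < v then some k else scanRef s v k

-- reference for B's running minimum of s[0..k]
def pmin2 (s : List Int) : Nat → Int
  | 0 => s.getD 0 0
  | k + 1 => if s.getD (k + 1) 0 < pmin2 s k then s.getD (k + 1) 0 else pmin2 s k

-- reference for B's e_found after processing indices 1..k
def efRef2 (s : List Int) : Nat → Int
  | 0 => -1
  | k + 1 => if s.getD (k + 1) 0 > pmin2 s k then ((k + 1 : Nat) : Int) else efRef2 s k

-- "index k qualifies": some earlier element is smaller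
def QProp (s : List Int) (k : Nat) : Prop := ∃ j < k, s.getD j 0 < s.getD k 0

theorem scanRef_eq_none_iff (s : List Int) (v : Int) (k : Nat) :
    scanRef s v k = none ↔ ∀ j < k, ¬ s.getD j 0 < v := by
  induction k with
  | zero => simp [scanRef]
  | succ k ih =>
    simp only [scanRef]
    split_ifs with h
    · constructor
      · intro hc; exact absurd hc (by simp)
      · intro hall; exact absurd (hall k (by omega)) (by simpa using h)
    · rw [ih]
      constructor
      · intro hall j hj
        rcases Nat.lt_succ_iff_lt_or_eq.mp hj with hj' | rfl
        · exact hall j hj'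
        · exact h
      · intro hall j hj; exact hall j (by omega)

theorem inner_eq (s : List Int) (v : Int) (k : Nat) :
    innerA s v k ((k : Int) - 1) = (scanRef s v k).map (fun j => (j : Int)) := by
  induction k with
  | zero => simp [innerA, scanRef]
  | succ k ih =>
    have h1 : ((k + 1 : Nat) : Int) - 1 = (k : Int) := by push_cast; ring
    simp only [innerA, h1, scanRef]
    rw [if_pos (by omega)]
    simp only [PySem.List.pyGetD_natCast]
    split_ifs with h
    · rfl
    · exact ih

-- A's outer loop returns (-1,-1) when nothing at or below n qualifies
theorem outerA_none (s : List Int) (n : Nat) (h : ∀ k ≤ n, ¬ QProp s k) :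
    outerA s n (n : Int) = (-1, -1) := by
  induction n with
  | zero => simp [outerA]
  | succ n ih =>
    have h1 : ((n + 1 : Nat) : Int) ≥ 1 := by omega
    have htn : ((n + 1 : Nat) : Int).toNat = n + 1 := by omega
    have hscan : scanRef s (s.getD (n + 1) 0) (n + 1) = none := by
      rw [scanRef_eq_none_iff]
      intro j hj hlt
      exact h (n + 1) (le_refl _) ⟨j, hj, hlt⟩
    have hin : innerA s (s.getD (n + 1) 0) (n + 1) (((n + 1 : Nat) : Int) - 1) = none := by
      rw [inner_eq, hscan]; rfl
    simp only [outerA, if_pos h1, htn, PySem.List.pyGetD_natCast, hin]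
    have h2 : ((n + 1 : Nat) : Int) - 1 = (n : Int) := by push_cast; ring
    rw [h2]
    exact ih (fun k hk => h k (by omega))

-- A's outer loop finds the largest qualifying index E and its inner-scan partner
theorem outerA_found (s : List Int) (n E : Nat) (hE : QProp s E) (hEn : E ≤ n)
    (hmax : ∀ k, E < k → k ≤ n → ¬ QProp s k) :
    ∃ j : Nat, scanRef s (s.getD E 0) E = some j ∧
      outerA s n (n : Int) = ((j : Int), (E : Int)) := by
  induction n with
  | zero =>
    exfalso
    have : E = 0 := by omega
    subst this
    obtain ⟨j, hj, _⟩ := hE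
    omega
  | succ n ih =>
    by_cases hcase : E = n + 1
    · subst hcase
      have hscan : scanRef s (s.getD (n + 1) 0) (n + 1) ≠ none := by
        rw [Ne, scanRef_eq_none_iff]
        push Not
        obtain ⟨j, hj, hlt⟩ := hE
        exact ⟨j, hj, hlt⟩
      obtain ⟨j, hj⟩ := Option.ne_none_iff_exists'.mp hscan
      refine ⟨j, hj, ?_⟩
      have h1 : ((n + 1 : Nat) : Int) ≥ 1 := by omega
      have htn : ((n + 1 : Nat) : Int).toNat = n + 1 := by omega
      have hin : innerA s (s.getD (n + 1) 0) (n + 1) (((n + 1 : Nat) : Int) - 1) = some (j : Int) := by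
        rw [inner_eq, hj]; rfl
      simp only [outerA, if_pos h1, htn, PySem.List.pyGetD_natCast, hin]
    · have hEn' : E ≤ n := by omega
      have hQn : ¬ QProp s (n + 1) := hmax (n + 1) (by omega) (le_refl _)
      have hscan : scanRef s (s.getD (n + 1) 0) (n + 1) = none := by
        rw [scanRef_eq_none_iff]
        intro j hj hlt
        exact hQn ⟨j, hj, hlt⟩
      have hin : innerA s (s.getD (n + 1) 0) (n + 1) (((n + 1 : Nat) : Int) - 1) = none := by
        rw [inner_eq, hscan]; rfl
      have h1 : ((n + 1 : Nat) : Int) ≥ 1 := by omega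
      have htn : ((n + 1 : Nat) : Int).toNat = n + 1 := by omega
      obtain ⟨j, hj, hout⟩ := ih hEn' (fun k h1 h2 => hmax k h1 (by omega))
      refine ⟨j, hj, ?_⟩
      simp only [outerA, if_pos h1, htn, PySem.List.pyGetD_natCast, hin]
      have h2 : ((n + 1 : Nat) : Int) - 1 = (n : Int) := by push_cast; ring
      rw [h2]
      exact hout

-- the running minimum characterises "some element at or before k is below v"
theorem pmin2_lt_iff (s : List Int) (v : Int) (k : Nat) :
    (pmin2 s k < v ↔ ∃ j ≤ k, s.getD j 0 < v) := by
  induction k with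
  | zero =>
    simp only [pmin2]
    constructor
    · intro h; exact ⟨0, le_refl _, h⟩
    · rintro ⟨j, hj, h⟩
      have : j = 0 := by omega
      subst this; exact h
  | succ k ih =>
    simp only [pmin2]
    split_ifs with hlt
    · constructor
      · intro h; exact ⟨k + 1, le_refl _, h⟩
      · rintro ⟨j, hj, h⟩
        rcases Nat.le_succ_iff.mp hj with hj' | rfl
        · have := ih.mpr ⟨j, hj', h⟩; omega
        · exact h
    · rw [ih]
      constructor
      · rintro ⟨j, hj, h⟩; exact ⟨j, by omega, h⟩
      · rintro ⟨j, hj, h⟩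
        rcases Nat.le_succ_iff.mp hj with hj' | rfl
        · exact ⟨j, hj', h⟩
        · exact ih.mp (lt_of_le_of_lt (not_lt.mp hlt) h)

-- B's e_found after the forward pass: -1 and no qualifier at or below n, or the largest qualifier
theorem ef2_spec (s : List Int) (n : Nat) :
    (efRef2 s n = -1 ∧ ∀ k ≤ n, ¬ QProp s k) ∨
    (∃ E : Nat, efRef2 s n = (E : Int) ∧ 1 ≤ E ∧ E ≤ n ∧ QProp s E ∧
      ∀ k, E < k → k ≤ n → ¬ QProp s k) := by
  induction n with
  | zero =>
    left
    refine ⟨rfl, ?_⟩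
    intro k hk
    have : k = 0 := by omega
    subst this
    rintro ⟨j, hj, _⟩; omega
  | succ n ih =>
    have hiff : pmin2 s n < s.getD (n + 1) 0 ↔ QProp s (n + 1) := by
      rw [pmin2_lt_iff]
      constructor
      · rintro ⟨j, hj, h⟩; exact ⟨j, by omega, h⟩
      · rintro ⟨j, hj, h⟩; exact ⟨j, by omega, h⟩
    by_cases hq : QProp s (n + 1)
    · right
      refine ⟨n + 1, ?_, by omega, le_refl _, hq, ?_⟩
      · simp only [efRef2]
        rw [if_pos (show s.getD (n + 1) 0 > pmin2 s n from hiff.mpr hq)]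
      · intro k h1 h2; omega
    · have hef : efRef2 s (n + 1) = efRef2 s n := by
        simp only [efRef2]
        rw [if_neg (fun h => hq (hiff.mp h))]
      rcases ih with ⟨h1, h2⟩ | ⟨E, h1, h2, h3, h4, h5⟩
      · left
        refine ⟨by rw [hef]; exact h1, ?_⟩
        intro k hk
        rcases Nat.le_succ_iff.mp hk with hk' | rfl
        · exact h2 k hk'
        · exact hq
      · right
        refine ⟨E, by rw [hef]; exact h1, h2, by omega, h4, ?_⟩
        intro k hk1 hk2
        rcases Nat.le_succ_iff.mp hk2 with hk' | rfl
        · exact h5 k hk1 hk'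
        · exact hq

-- B's forward fold equals the reference pair
theorem fold_eq2 (s : List Int) (n : Nat) :
    (PySem.List.pyRange 1 ((n : Int) + 1) 1).foldl (fwdStep s)
      (-1, PySem.List.pyGetD s 0 0) = (efRef2 s n, pmin2 s n) := by
  induction n with
  | zero =>
    rw [show ((0 : Nat) : Int) + 1 = 1 by norm_num, PySem.List.pyRange_one_eq_nil (by omega)]
    simp only [List.foldl_nil, efRef2, pmin2]
    congr 1
    simpa using PySem.List.pyGetD_natCast s 0 0
  | succ n ih =>
    have hne : ((n + 1 : Nat) : Int) + 1 = ((n : Int) + 1) + 1 := by push_cast; ring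
    rw [hne, PySem.List.pyRange_one_succ_right (by omega), List.foldl_append, ih]
    simp only [List.foldl_cons, List.foldl_nil, fwdStep]
    have hc : (n : Int) + 1 = ((n + 1 : Nat) : Int) := by push_cast; ring
    rw [hc, PySem.List.pyGetD_natCast]
    simp only [efRef2, pmin2]

-- B's backward find? equals the same inner-scan reference
theorem bscan_eq (s : List Int) (v : Int) (k : Nat) :
    (PySem.List.pyRange ((k : Int) - 1) (-1) (-1)).find?
        (fun i => decide (v > PySem.List.pyGetD s i 0)) =
      (scanRef s v k).map (fun j => (j : Int)) := by
  induction k with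
  | zero =>
    rw [PySem.List.pyRange_neg_one_eq_nil (by omega)]
    rfl
  | succ k ih =>
    have h1 : ((k + 1 : Nat) : Int) - 1 = (k : Int) := by push_cast; ring
    rw [h1, PySem.List.pyRange_neg_one_cons (by omega)]
    simp only [List.find?_cons]
    have hb : decide (v > PySem.List.pyGetD s ((k : Nat) : Int) 0) = decide (s.getD k 0 < v) := by
      rw [PySem.List.pyGetD_natCast]
    rw [hb]
    simp only [scanRef]
    split_ifs with h
    · rw [decide_eq_true h]
      rfl
    · rw [decide_eq_false h]
      exact ih

-- main equality on nonnegative end_: both ports compute the same pair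
theorem ports_eq_of_nonneg (s : List Int) (n : Nat) :
    outerA s n (n : Int) = find_alt s (n : Int) := by
  cases n with
  | zero => rfl
  | succ n =>
    unfold find_alt
    rw [if_neg (show ¬ ((n + 1 : Nat) : Int) < 1 by omega), fold_eq2]
    rcases ef2_spec s (n + 1) with ⟨h1, h2⟩ | ⟨E, h1, h2, h3, h4, h5⟩
    · simp only [h1]
      exact outerA_none s (n + 1) h2
    · have hEne : (E : Int) ≠ -1 := by omega
      simp only [h1, if_neg hEne, PySem.List.pyGetD_natCast]
      obtain ⟨j, hj, hout⟩ := outerA_found s (n + 1) E h4 h3 h5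
      rw [bscan_eq, hj, hout]
      rfl

-- ===== VERDICT (by name: the statement is the Claim_ definition above) =====
theorem find_spec : Claim_equal_find := by
  intro strings end_ _ _
  unfold Spec_find
  by_cases h : 0 ≤ end_
  · have : end_ = ((end_.toNat : Nat) : Int) := by omega
    rw [this]
    show outerA strings (((end_.toNat : Nat) : Int)).toNat _ = _
    rw [Int.toNat_natCast]
    exact ports_eq_of_nonneg strings end_.toNat
  · have ht : end_.toNat = 0 := by omega
    show outerA strings end_.toNat end_ = _
    rw [ht]
    unfold find_alt
    rw [if_pos (by omega)]
    rfl
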